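-- pv_equiv track=rewrite | github.com/Priyanshu0Saxena/Breaking_Cipher_text | solver.py | weightOfMostCommonWords
-- ===== SOURCE A (Python) =====
-- def weightOfMostCommonWords(decrypted):
--     score=0
--     mostCommonWords = [
--     "the", "be", "to", "of", "and", "a", "in", "that", "have", "i",
--     "it", "for", "not", "on", "with", "he", "as", "you", "do", "at",
--     "this", "but", "his", "by", "from", "they", "we", "say", "her", "she",
--     "or", "an", "will", "my", "one", "all", "would", "there", "their",
--     "is", "are", "was", "were", "been", "being"
--     ]
--     for word in decrypted:
--         if word in mostCommonWords:
--             score = score+1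
--     return score
-- ===== SOURCE B (Python) =====
-- from collections import Counter
--
-- _COMMON = ("the be to of and a in that have i it for not on with he as you do at "
--            "this but his by from they we say her she or an will my one all would "
--            "there their is are was were been being").split()
--
-- def weightOfMostCommonWords(decrypted):
--     counts = Counter(decrypted)
--     return sum(counts[w] for w in _COMMON)
-- ===== Notes on version B (the rewrite author's own statement) =====
-- stated objective: faster
-- what changed: B builds a Counter of the input once and sums the counts of the 45 fixed common words (kept as one space-separated string split at startup), flipping the traversal from scanning the input with a per-word linear membership test to indexing a prebuilt frequency table from the word-list side.
import Mathlib
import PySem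

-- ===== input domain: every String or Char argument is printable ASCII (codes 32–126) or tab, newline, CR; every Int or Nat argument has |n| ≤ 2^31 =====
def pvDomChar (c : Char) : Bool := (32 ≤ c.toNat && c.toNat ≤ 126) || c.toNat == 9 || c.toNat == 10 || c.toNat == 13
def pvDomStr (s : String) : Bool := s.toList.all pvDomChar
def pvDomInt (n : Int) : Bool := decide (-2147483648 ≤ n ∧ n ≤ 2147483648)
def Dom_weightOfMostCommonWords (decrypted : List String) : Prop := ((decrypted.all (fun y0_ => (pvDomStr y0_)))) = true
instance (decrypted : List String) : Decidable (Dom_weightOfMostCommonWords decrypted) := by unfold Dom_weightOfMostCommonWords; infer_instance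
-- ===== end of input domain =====

set_option maxRecDepth 10000


-- B builds a frequency table of the input once (Counter) and sums the counts of the fixed common
-- words (kept as one space-separated string, split once), instead of scanning the input with a
-- per-word membership test.

-- ===== PORT A =====
def mostCommonWordsA : List String := [
  "the", "be", "to", "of", "and", "a", "in", "that", "have", "i",
  "it", "for", "not", "on", "with", "he", "as", "you", "do", "at",
  "this", "but", "his", "by", "from", "they", "we", "say", "her", "she",
  "or", "an", "will", "my", "one", "all", "would", "there", "their",
  "is", "are", "was", "were", "been", "being"]

def weightOfMostCommonWords (decrypted : List String) : Int :=
  decrypted.foldl (fun score word => if word ∈ mostCommonWordsA then score + 1 else score) 0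

-- ===== PORT B =====
def commonBlob : String :=
  "the be to of and a in that have i it for not on with he as you do at this but his by from they we say her she or an will my one all would there their is are was were been being"

def commonWords : List String := PySem.Str.split₀ commonBlob

def weightOfMostCommonWords_alt (decrypted : List String) : Int :=
  (commonWords.map (fun w => (PySem.Dict.counter decrypted).getD w 0)).sum

-- ===== PRECONDITION & SPEC =====
def Spec_weightOfMostCommonWords (decrypted : List String) (out : Int) : Prop := out = weightOfMostCommonWords_alt decrypted
instance (decrypted : List String) (out : Int) : Decidable (Spec_weightOfMostCommonWords decrypted out) := by unfold Spec_weightOfMostCommonWords; infer_instance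

-- ===== CLAIM (what is proved, stated in full; the proofs are below) =====
def Claim_equal_weightOfMostCommonWords : Prop := ∀ (decrypted : List String), Dom_weightOfMostCommonWords decrypted → Spec_weightOfMostCommonWords decrypted (weightOfMostCommonWords decrypted)

-- ===== LEMMAS AND PROOFS =====

-- B's split word list is exactly A's literal list
lemma commonWords_eq : commonWords = mostCommonWordsA := by decide

-- B as a sum of per-word counts of the input
lemma alt_eq_sum (xs : List String) :
    weightOfMostCommonWords_alt xs = (mostCommonWordsA.map (fun w => (xs.count w : Int))).sum := by
  unfold weightOfMostCommonWords_alt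
  rw [commonWords_eq]
  simp [PySem.Dict.getD_counter]

-- for a nodup word list, the per-element indicator sums to a membership test
lemma sum_indicator_nodup (l : List String) (hl : l.Nodup) (x : String) :
    (l.map (fun w => if w = x then (1 : Int) else 0)).sum = if x ∈ l then 1 else 0 := by
  induction l with
  | nil => simp
  | cons a t ih =>
    simp only [List.nodup_cons] at hl
    simp only [List.map_cons, List.sum_cons, ih hl.2, List.mem_cons]
    by_cases h : a = x
    · subst h
      simp [hl.1]
    · simp [h, Ne.symm h]

-- the common-word sum of counts counts exactly the common occurrences
lemma sum_counts_eq (xs : List String) :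
    (mostCommonWordsA.map (fun w => (xs.count w : Int))).sum
      = xs.foldl (fun score word => if word ∈ mostCommonWordsA then score + 1 else score) 0 := by
  induction xs with
  | nil => simp [List.count_nil]
  | cons x t ih =>
    have hsplit :
        (mostCommonWordsA.map (fun w => ((x :: t).count w : Int))).sum
          = (mostCommonWordsA.map (fun w => (t.count w : Int))).sum
            + (mostCommonWordsA.map (fun w => if w = x then (1 : Int) else 0)).sum := by
      rw [← List.sum_map_add]
      apply congrArg
      apply List.map_congr_left
      intro w _
      by_cases h : x = w
      · subst h; simp [List.count_cons_self]
      · simp [List.count_cons, Ne.symm h]; exact h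
    have hnodup : mostCommonWordsA.Nodup := by decide
    rw [hsplit, sum_indicator_nodup _ hnodup x]
    rw [List.foldl_cons]
    have hshift : ∀ (l : List String) (a : Int),
        l.foldl (fun score word => if word ∈ mostCommonWordsA then score + 1 else score) a
          = a + l.foldl (fun score word => if word ∈ mostCommonWordsA then score + 1 else score) 0 := by
      intro l
      induction l with
      | nil => simp
      | cons y u ihl =>
        intro a
        simp only [List.foldl_cons]
        rw [ihl, ihl (if y ∈ mostCommonWordsA then (0:Int) + 1 else 0)]
        split_ifs <;> ring
    rw [hshift t, ih]
    split_ifs <;> ring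

-- ===== VERDICT (by name: the statement is the Claim_ definition above) =====
theorem weightOfMostCommonWords_spec : Claim_equal_weightOfMostCommonWords := by
  intro xs _
  show weightOfMostCommonWords xs = weightOfMostCommonWords_alt xs
  rw [alt_eq_sum, sum_counts_eq]
  rfl
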